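-- pv_equiv track=rewrite | github.com/Uniaut/BadmintonDL | src/etl/transform/event/event_detect.py | change_detection
-- ===== SOURCE A (Python) =====
-- def only_features(features: tuple) -> tuple:
--     '''
--     extract only features from with extra data
--     PARAMETER:
--         features: tuple - features
--     RETURN:
--         tuple - features
--     '''
--     return [feature for feature, extra in features]
--
-- def change_detection(sequence: list) -> list:
--     '''
--     detect of change on features of frame
--     PARAMETER:
--         sequence: list - sequence of features
--     RETURN:
--         list - sequence of events
--     '''
--     events = []
--     for idx, element in enumerate(sequence):
--         if idx == 0:
--             continue
--
--         frame_no, features = element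
--         prev_features = sequence[idx - 1][1]
--         if only_features(features)[:2] != only_features(prev_features)[:2]:
--             events.append((frame_no, prev_features, features))
--     return events
-- ===== SOURCE B (Python) =====
-- def change_detection(sequence: list) -> list:
--     '''
--     detect of change on features of frame
--     PARAMETER:
--         sequence: list - sequence of features
--     RETURN:
--         list - sequence of events
--     '''
--     # group consecutive frames into maximal runs sharing the same comparison
--     # key (first two feature names), then emit one event per run boundary
--     runs = []
--     for elem in sequence:
--         key = [feature for feature, extra in elem[1]][:2]
--         if runs and runs[-1][0] == key:
--             runs[-1][1].append(elem)
--         else: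
--             runs.append((key, [elem]))
--     return [(cur[1][0][0], prev[1][-1][1], cur[1][0][1])
--             for prev, cur in zip(runs, runs[1:])]
-- ===== Notes on version B (the rewrite author's own statement) =====
-- stated objective: alternative
-- what changed: B builds a run-length grouping of the sequence (maximal runs of consecutive frames with equal first-two-feature keys) and then emits one event per run boundary, instead of A's index loop that re-extracts and compares both adjacent frames' feature lists at every position.
import Mathlib
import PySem

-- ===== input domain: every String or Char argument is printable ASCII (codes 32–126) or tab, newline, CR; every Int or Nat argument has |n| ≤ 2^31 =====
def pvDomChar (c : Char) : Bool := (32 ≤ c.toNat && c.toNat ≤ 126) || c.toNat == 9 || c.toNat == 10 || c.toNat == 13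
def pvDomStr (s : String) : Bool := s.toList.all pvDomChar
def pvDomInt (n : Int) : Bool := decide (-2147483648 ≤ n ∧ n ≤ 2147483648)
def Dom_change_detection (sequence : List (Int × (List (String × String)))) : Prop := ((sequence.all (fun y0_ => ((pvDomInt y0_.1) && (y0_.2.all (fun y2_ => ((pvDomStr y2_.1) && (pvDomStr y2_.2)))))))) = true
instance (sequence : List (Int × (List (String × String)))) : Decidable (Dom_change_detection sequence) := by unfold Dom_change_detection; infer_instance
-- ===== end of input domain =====

-- B groups the sequence into maximal runs of consecutive frames with equal first-two-feature keys and emits one event per run boundary, instead of A's index loop comparing adjacent frames' re-extracted features (objective: alternative algorithm, same asymptotic cost).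

-- ===== PORT A =====
-- only_features(features): [feature for feature, extra in features]
def only_features (features : List (String × String)) : List String :=
  features.map (fun p => p.1)

-- literal port of A: enumerate loop, skip idx 0, index sequence[idx-1], compare [:2] keys
def change_detection (sequence : List (Int × (List (String × String)))) : List (Int × (List (String × String)) × (List (String × String))) :=
  (PySem.List.enumerate sequence).foldl (init := []) fun events (idx, element) =>
    if idx = 0 then events
    else
      let frame_no := element.1
      let features := element.2
      match PySem.List.pyGet? sequence (idx - 1) with
      | none => events  -- unreachable: 1 ≤ idx < len(sequence)
      | some prev =>
        let prev_features := prev.2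
        if PySem.List.slice (only_features features) none (some 2) ≠
           PySem.List.slice (only_features prev_features) none (some 2)
        then events ++ [(frame_no, prev_features, features)]
        else events

-- ===== PORT B =====
-- key = [feature for feature, extra in elem[1]][:2]
def pvKey (features : List (String × String)) : List String :=
  PySem.List.slice (features.map (fun p => p.1)) none (some 2)

-- one iteration of B's grouping loop; Python's in-place append to runs[-1][1]
-- is ported functionally as dropLast ++ [last run with the element appended]
def pvAddElem (runs : List (List String × List (Int × List (String × String))))
    (elem : Int × List (String × String)) :
    List (List String × List (Int × List (String × String))) :=
  match runs.getLast? with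
  | some r =>
    if r.1 = pvKey elem.2 then runs.dropLast ++ [(r.1, r.2 ++ [elem])]
    else runs ++ [(pvKey elem.2, [elem])]
  | none => [(pvKey elem.2, [elem])]

-- (cur[1][0][0], prev[1][-1][1], cur[1][0][1]); runs are nonempty, so the indexings succeed
def pvBoundary (p c : List String × List (Int × List (String × String))) :
    List (Int × (List (String × String)) × (List (String × String))) :=
  match PySem.List.pyGet? c.2 0, PySem.List.pyGet? p.2 (-1) with
  | some ch, some pl => [(ch.1, pl.2, ch.2)]
  | _, _ => []  -- unreachable

def change_detection_alt (sequence : List (Int × (List (String × String)))) : List (Int × (List (String × String)) × (List (String × String))) :=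
  let runs := sequence.foldl pvAddElem []
  (runs.zip (PySem.List.slice runs (some 1) none)).flatMap fun pc => pvBoundary pc.1 pc.2

-- ===== PRECONDITION & SPEC =====
def Spec_change_detection (sequence : List (Int × (List (String × String)))) (out : List (Int × (List (String × String)) × (List (String × String)))) : Prop := out = change_detection_alt sequence
instance (sequence : List (Int × (List (String × String)))) (out : List (Int × (List (String × String)) × (List (String × String)))) : Decidable (Spec_change_detection sequence out) := by unfold Spec_change_detection; infer_instance

-- ===== CLAIM (what is proved, stated in full; the proofs are below) =====
def Claim_equal_change_detection : Prop := ∀ (sequence : List (Int × (List (String × String)))), Dom_change_detection sequence → Spec_change_detection sequence (change_detection sequence)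

-- ===== LEMMAS AND PROOFS =====
-- common adjacent-pair recursion both ports are shown equal to
def pvPairs (sequence : List (Int × (List (String × String)))) : List (Int × (List (String × String)) × (List (String × String))) :=
  match sequence with
  | [] => []
  | [_] => []
  | a :: b :: t =>
    (if pvKey b.2 ≠ pvKey a.2 then [(b.1, a.2, b.2)] else []) ++ pvPairs (b :: t)

-- the boundary pass, written as a recursion over adjacent runs
def pvE (rs : List (List String × List (Int × List (String × String)))) :
    List (Int × (List (String × String)) × (List (String × String))) :=
  match rs with
  | [] => []
  | [_] => []
  | a :: b :: t => pvBoundary a b ++ pvE (b :: t)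

theorem zip_flatMap_eq_pvE (rs : List (List String × List (Int × List (String × String)))) :
    (rs.zip rs.tail).flatMap (fun pc => pvBoundary pc.1 pc.2) = pvE rs := by
  induction rs with
  | nil => simp [pvE]
  | cons a t ih =>
    cases t with
    | nil => simp [pvE]
    | cons b t' =>
      simp only [List.tail_cons, List.zip_cons_cons, List.flatMap_cons] at ih ⊢
      rw [pvE]
      cases t' <;> simp_all [pvE]

theorem pvE_snoc (rs : List (List String × List (Int × List (String × String)))) (x) :
    pvE (rs ++ [x]) = pvE rs ++ (match rs.getLast? with
      | none => []
      | some l => pvBoundary l x) := by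
  induction rs with
  | nil => simp [pvE]
  | cons a t ih =>
    cases t with
    | nil => simp [pvE]
    | cons b t' =>
      simp only [List.cons_append, List.getLast?_cons_cons] at ih ⊢
      simp only [pvE]
      rw [ih]
      cases (b :: t').getLast? <;> simp

theorem pvPairs_snoc (p : List (Int × (List (String × String)))) (e) :
    pvPairs (p ++ [e]) = pvPairs p ++ (match p.getLast? with
      | none => []
      | some lp => if pvKey e.2 ≠ pvKey lp.2 then [(e.1, lp.2, e.2)] else []) := by
  induction p with
  | nil => simp [pvPairs]
  | cons a t ih =>
    cases t with
    | nil => simp [pvPairs]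
    | cons b t' =>
      simp only [List.cons_append, List.getLast?_cons_cons] at ih ⊢
      simp only [pvPairs]
      rw [ih]
      cases (b :: t').getLast? <;> simp

-- head of a nonempty list is unchanged by appending
theorem pyGet?_zero_append (l : List (Int × List (String × String))) (e) (h : l ≠ []) :
    PySem.List.pyGet? (l ++ [e]) 0 = PySem.List.pyGet? l 0 := by
  cases l with
  | nil => exact absurd rfl h
  | cons a t => simp [PySem.List.pyGet?_zero]

theorem pvAddElem_eq_of_getLast (runs : List (List String × List (Int × List (String × String))))
    (r : List String × List (Int × List (String × String)))
    (elem : Int × List (String × String)) (hr : runs.getLast? = some r) :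
    pvAddElem runs elem =
      if r.1 = pvKey elem.2 then runs.dropLast ++ [(r.1, r.2 ++ [elem])]
      else runs ++ [(pvKey elem.2, [elem])] := by
  unfold pvAddElem; rw [hr]

-- invariant of B's grouping fold
def pvInv (p : List (Int × (List (String × String))))
    (rs : List (List String × List (Int × List (String × String)))) : Prop :=
  pvE rs = pvPairs p ∧
  match p.getLast?, rs.getLast? with
  | none, none => rs = []
  | some lp, some r => r.1 = pvKey lp.2 ∧ r.2.getLast? = some lp ∧ r.2 ≠ []
  | _, _ => False

theorem fold_inv (p : List (Int × (List (String × String)))) :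
    pvInv p (p.foldl pvAddElem []) := by
  induction p using List.reverseRecOn with
  | nil => exact ⟨rfl, by simp⟩
  | append_singleton p e ih =>
    rw [List.foldl_append, List.foldl_cons, List.foldl_nil]
    set rs := p.foldl pvAddElem [] with hrs
    obtain ⟨hE, hlast⟩ := ih
    cases hp : p.getLast? with
    | none =>
      -- p = []
      have hpnil : p = [] := List.getLast?_eq_none_iff.mp hp
      have hrsnil : rs = [] := by
        rw [hp] at hlast
        cases h' : rs.getLast? with
        | none => rw [h'] at hlast; exact hlast
        | some r => rw [h'] at hlast; exact absurd hlast not_false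
      subst hpnil
      rw [hrsnil]
      unfold pvInv
      refine ⟨by simp [pvAddElem, pvE, pvPairs], ?_⟩
      simp [pvAddElem]
    | some lp =>
      rw [hp] at hlast
      cases hr : rs.getLast? with
      | none => rw [hr] at hlast; exact absurd hlast not_false
      | some r =>
        rw [hr] at hlast
        obtain ⟨hk, hrl, hrne⟩ := hlast
        have hrs_ne : rs ≠ [] := by
          intro h; rw [h] at hr; simp at hr
        have h1 : rs.getLast hrs_ne = r := by
          have h2 := List.getLast?_eq_some_getLast (l := rs) hrs_ne
          rw [hr] at h2
          exact (Option.some_inj.mp h2).symm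
        have hsplit : rs.dropLast ++ [r] = rs := by
          rw [← h1]; exact List.dropLast_append_getLast hrs_ne
        rw [pvAddElem_eq_of_getLast rs r e hr]
        by_cases hke : r.1 = pvKey e.2
        · -- same key: extend the last run; no new event
          rw [if_pos hke]
          unfold pvInv
          refine ⟨?_, ?_⟩
          · have h1 : pvE (rs.dropLast ++ [(r.1, r.2 ++ [e])]) = pvE (rs.dropLast ++ [r]) := by
              rw [pvE_snoc, pvE_snoc]
              cases hd : rs.dropLast.getLast? with
              | none => rfl
              | some l =>
                have : pvBoundary l (r.1, r.2 ++ [e]) = pvBoundary l r := by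
                  unfold pvBoundary
                  rw [pyGet?_zero_append r.2 e hrne]
                simp [this]
            rw [h1, hsplit, hE, pvPairs_snoc, hp]
            have : ¬ pvKey e.2 ≠ pvKey lp.2 := by
              rw [← hk, ← hke]
              simp
            simp [this]
          · simp [hke]
        · -- new key: start a new run; one event at the boundary
          rw [if_neg hke]
          unfold pvInv
          refine ⟨?_, ?_⟩
          · rw [pvE_snoc, hr, hE, pvPairs_snoc, hp]
            have hb : pvBoundary r (pvKey e.2, [e]) = [(e.1, lp.2, e.2)] := by
              unfold pvBoundary
              rw [PySem.List.pyGet?_neg_one, hrl]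
              simp
            have hne2 : pvKey e.2 ≠ pvKey lp.2 := by rw [← hk]; exact fun h => hke h.symm
            simp [hb, hne2]
          · simp

theorem alt_eq_pvPairs (s : List (Int × (List (String × String)))) :
    change_detection_alt s = pvPairs s := by
  have h : change_detection_alt s =
      ((s.foldl pvAddElem []).zip
        (PySem.List.slice (s.foldl pvAddElem []) (some 1) none)).flatMap
        (fun pc => pvBoundary pc.1 pc.2) := rfl
  rw [h, PySem.List.slice_from_one, zip_flatMap_eq_pvE]
  exact (fold_inv s).1

theorem a_eq_pvPairs (s : List (Int × (List (String × String)))) :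
    change_detection s = pvPairs s := by
  have main : ∀ (rest pre : List (Int × (List (String × String)))) prev acc,
      (PySem.List.enumerate rest ((pre.length : Int) + 1)).foldl
        (fun events (p : Int × (Int × (List (String × String)))) =>
          if p.1 = 0 then events
          else
            match PySem.List.pyGet? (pre ++ prev :: rest) (p.1 - 1) with
            | none => events
            | some pr =>
              if PySem.List.slice (only_features p.2.2) none (some 2) ≠
                 PySem.List.slice (only_features pr.2) none (some 2)
              then events ++ [(p.2.1, pr.2, p.2.2)]
              else events) acc
        = acc ++ pvPairs (prev :: rest) := by
    intro rest
    induction rest with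
    | nil => intro pre prev acc; simp [pvPairs, PySem.List.enumerate_nil]
    | cons b t ih =>
      intro pre prev acc
      rw [PySem.List.enumerate_cons, List.foldl_cons]
      have hne : ((pre.length : Int) + 1) ≠ 0 := by positivity
      have hget : PySem.List.pyGet? (pre ++ prev :: b :: t) (((pre.length : Int) + 1) - 1)
          = some prev := by
        rw [show ((pre.length : Int) + 1) - 1 = (pre.length : Int) from by ring]
        exact PySem.List.pyGet?_append_length pre (b :: t) prev
      have step := ih (pre ++ [prev]) b
      simp only [List.append_assoc, List.cons_append, List.nil_append] at step
      have hlen : ((pre.length : Int) + 1 + 1) = (((pre ++ [prev]).length : Int) + 1) := by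
        push_cast [List.length_append, List.length_cons, List.length_nil]
        ring
      simp only [hne, if_false, hget]
      by_cases h : PySem.List.slice (only_features b.2) none (some 2) ≠
          PySem.List.slice (only_features prev.2) none (some 2)
      · rw [if_pos h, hlen, step]
        have hk : pvKey b.2 ≠ pvKey prev.2 := by
          simpa [pvKey, only_features] using h
        simp [pvPairs, hk]
      · rw [if_neg h, hlen, step]
        have hk : ¬ pvKey b.2 ≠ pvKey prev.2 := by
          simpa [pvKey, only_features] using h
        simp [pvPairs, hk]
  cases s with
  | nil => simp [change_detection, pvPairs, PySem.List.enumerate_nil]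
  | cons a t =>
    unfold change_detection
    rw [PySem.List.enumerate_cons, List.foldl_cons]
    simp only [reduceIte]
    have := main t [] a []
    simpa using this

-- ===== VERDICT (by name: the statement is the Claim_ definition above) =====
theorem change_detection_spec : Claim_equal_change_detection := by
  intro s _
  unfold Spec_change_detection
  rw [a_eq_pvPairs, alt_eq_pvPairs]
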